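-- pv_equiv track=rewrite | github.com/NikolaySimakov/algorithms | leetcode/two_pointers/2161.py | pivotArrayTwoPointers
-- ===== SOURCE A (Python) =====
-- from typing import List
--
-- def pivotArrayTwoPointers(nums: List[int], pivot: int) -> List[int]:
--     n = len(nums)
--     res = [0] * n
--     l, r = 0, n - 1
--
--     for i in range(n):
--
--         if nums[i] < pivot:
--             res[l] = nums[i]
--             l += 1
--
--         if nums[n - i - 1] > pivot:
--             res[r] = nums[n - i - 1]
--             r -= 1
--
--     while l <= r:
--         res[l] = pivot
--         l += 1
--
--     return res
-- ===== SOURCE B (Python) =====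
-- def pivotArrayTwoPointers(nums, pivot):
--     less = [x for x in nums if x < pivot]
--     greater = [x for x in nums if x > pivot]
--     return less + [pivot] * (len(nums) - len(less) - len(greater)) + greater
-- ===== Notes on version B (the rewrite author's own statement) =====
-- stated objective: simpler
-- what changed: Replaces the preallocated result array with converging l/r write-pointers and a final pivot-filling while-loop by a single comprehension pass collecting 'less' and 'greater' buckets and concatenating less + pivot-block + greater.
import Mathlib
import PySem

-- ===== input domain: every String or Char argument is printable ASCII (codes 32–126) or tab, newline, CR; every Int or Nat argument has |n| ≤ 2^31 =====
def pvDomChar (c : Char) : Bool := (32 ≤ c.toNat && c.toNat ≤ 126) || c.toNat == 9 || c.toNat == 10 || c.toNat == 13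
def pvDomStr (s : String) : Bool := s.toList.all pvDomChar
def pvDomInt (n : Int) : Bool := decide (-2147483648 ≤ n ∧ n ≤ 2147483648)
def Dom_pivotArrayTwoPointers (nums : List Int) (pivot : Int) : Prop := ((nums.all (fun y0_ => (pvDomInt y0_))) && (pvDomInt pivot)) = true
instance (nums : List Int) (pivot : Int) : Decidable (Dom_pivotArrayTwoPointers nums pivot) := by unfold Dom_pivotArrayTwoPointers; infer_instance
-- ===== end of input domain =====

-- B replaces A's two converging write-pointers into a preallocated array (plus a trailing
-- pivot-filling while-loop) with bucket collection and concatenation; same cost, simpler.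

-- ===== PORT A =====
-- the trailing `while l <= r: res[l] = pivot; l += 1`
def fillA (res : List Int) (l r pivot : Int) : List Int :=
  if l ≤ r then fillA (res.set l.toNat pivot) (l + 1) r pivot else res
termination_by (r + 1 - l).toNat
decreasing_by omega

def loopBody (nums : List Int) (pivot : Int) (st : List Int × Int × Int) (i : Nat) : List Int × Int × Int :=
  let n := nums.length
  let res := st.1
  let l := st.2.1
  let r := st.2.2
  let (res, l) := if nums.getD i 0 < pivot then (res.set l.toNat (nums.getD i 0), l + 1) else (res, l)
  let (res, r) := if pivot < nums.getD (n - i - 1) 0 then (res.set r.toNat (nums.getD (n - i - 1) 0), r - 1) else (res, r)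
  (res, l, r)

-- for i in range(n) the loop body; i is 0..n-1, so nums[i] and nums[n-i-1] are in range and
-- getD with these in-range indices is exact Python indexing
def pivotArrayTwoPointers (nums : List Int) (pivot : Int) : List Int :=
  let n := nums.length
  let s := (List.range n).foldl (loopBody nums pivot) (List.replicate n (0 : Int), (0 : Int), (n : Int) - 1)
  fillA s.1 s.2.1 s.2.2 pivot

def pivotArrayTwoPointers_alt (nums : List Int) (pivot : Int) : List Int :=
  let less := nums.filter (fun x => x < pivot)
  let greater := nums.filter (fun x => pivot < x)
  less ++ List.replicate (nums.length - less.length - greater.length) pivot ++ greater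


-- ===== PRECONDITION & SPEC =====
def Spec_pivotArrayTwoPointers (nums : List Int) (pivot : Int) (out : List Int) : Prop := out = pivotArrayTwoPointers_alt nums pivot
instance (nums : List Int) (pivot : Int) (out : List Int) : Decidable (Spec_pivotArrayTwoPointers nums pivot out) := by unfold Spec_pivotArrayTwoPointers; infer_instance

-- ===== CLAIM (what is proved, stated in full; the proofs are below) =====
def Claim_equal_pivotArrayTwoPointers : Prop := ∀ (nums : List Int) (pivot : Int), Dom_pivotArrayTwoPointers nums pivot → Spec_pivotArrayTwoPointers nums pivot (pivotArrayTwoPointers nums pivot)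

-- ===== LEMMAS AND PROOFS =====
-- lemma 1: the two filters are disjoint
theorem filter_lt_gt_len (p : Int) (l : List Int) :
    (l.filter (fun x => decide (x < p))).length + (l.filter (fun x => decide (p < x))).length ≤ l.length := by
  induction l with
  | nil => simp
  | cons a t ih =>
    by_cases h1 : a < p <;> by_cases h2 : p < a <;>
      simp [h1, h2] <;> omega

-- counting lemma for the less-side write
theorem countA (nums : List Int) (p : Int) (k : Nat) (hk : k < nums.length)
    (ha : nums.getD k 0 < p) :
    ((nums.take k).filter (fun x => decide (x < p))).length +
      ((nums.drop (nums.length - k)).filter (fun x => decide (p < x))).length + 1 ≤ nums.length := by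
  have ha' : nums[k] < p := by rwa [List.getD_eq_getElem nums 0 hk] at ha
  set n := nums.length with hn
  by_cases h2 : 2 * k < n
  · have h3 : ((nums.take k).filter (fun x => decide (x < p))).length ≤ k := by
      have := List.length_filter_le (fun x => decide (x < p)) (nums.take k)
      simp at this; omega
    have h4 : ((nums.drop (n - k)).filter (fun x => decide (p < x))).length ≤ k := by
      have := List.length_filter_le (fun x => decide (p < x)) (nums.drop (n - k))
      simp at this; omega
    omega
  · have hnk : n - k ≤ k := by omega
    set O := (nums.take k).drop (n - k) with hOdef
    have eq1 : nums.drop (n - k) = O ++ nums.drop k := by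
      conv_lhs => rw [← List.take_append_drop k nums]
      rw [List.drop_append]
      have h0 : n - k - (nums.take k).length = 0 := by simp [← hn]; omega
      rw [h0, List.drop_zero, hOdef]
    have eq2 : nums.take k = nums.take (n - k) ++ O := by
      conv_lhs => rw [← List.take_append_drop (n - k) (nums.take k)]
      rw [List.take_take, min_eq_left hnk, hOdef]
    have eq3 : nums.drop k = nums[k] :: nums.drop (k + 1) := List.drop_eq_getElem_cons hk
    have hO := filter_lt_gt_len p O
    have hOlen : O.length = k - (n - k) := by simp [hOdef, ← hn]; omega
    have b1 : ((nums.take (n - k)).filter (fun x => decide (x < p))).length ≤ n - k := by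
      have := List.length_filter_le (fun x => decide (x < p)) (nums.take (n - k))
      simp at this; omega
    have b2 : ((nums.drop (k + 1)).filter (fun x => decide (p < x))).length ≤ n - k - 1 := by
      have := List.length_filter_le (fun x => decide (p < x)) (nums.drop (k + 1))
      simp at this; omega
    rw [eq1, eq3, List.filter_append, List.filter_cons_of_neg (by simp; omega)]
    conv_lhs => rw [eq2, List.filter_append]
    simp only [List.length_append]
    omega

-- counting lemma for the greater-side write
theorem countB (nums : List Int) (p : Int) (k : Nat) (hk : k < nums.length)
    (hb : p < nums.getD (nums.length - 1 - k) 0) :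
    ((nums.take (k + 1)).filter (fun x => decide (x < p))).length +
      ((nums.drop (nums.length - k)).filter (fun x => decide (p < x))).length + 1 ≤ nums.length := by
  obtain ⟨j, hjdef⟩ : ∃ j, nums.length - 1 - k = j := ⟨_, rfl⟩
  rw [hjdef] at hb
  have hjn : j < nums.length := by omega
  have hb' : p < nums[j] := by rwa [List.getD_eq_getElem nums 0 hjn] at hb
  have hjk : nums.length - k = j + 1 := by omega
  rw [hjk]
  set n := nums.length with hn
  by_cases h2 : k + 1 ≤ j
  · have h3 : ((nums.take (k + 1)).filter (fun x => decide (x < p))).length ≤ k + 1 := by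
      have := List.length_filter_le (fun x => decide (x < p)) (nums.take (k + 1))
      simp at this; omega
    have h4 : ((nums.drop (j + 1)).filter (fun x => decide (p < x))).length ≤ k := by
      have := List.length_filter_le (fun x => decide (p < x)) (nums.drop (j + 1))
      simp at this; omega
    omega
  · have hjle : j + 1 ≤ k + 1 := by omega
    have hk1 : k + 1 ≤ n := by omega
    set O := (nums.take (k + 1)).drop (j + 1) with hOdef
    have eq1 : nums.drop (j + 1) = O ++ nums.drop (k + 1) := by
      conv_lhs => rw [← List.take_append_drop (k + 1) nums]
      rw [List.drop_append]
      have h0 : j + 1 - (nums.take (k + 1)).length = 0 := by simp [← hn]; omega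
      rw [h0, List.drop_zero, hOdef]
    have eq2 : nums.take (k + 1) = nums.take (j + 1) ++ O := by
      conv_lhs => rw [← List.take_append_drop (j + 1) (nums.take (k + 1))]
      rw [List.take_take, min_eq_left hjle, hOdef]
    have eqj : nums.take (j + 1) = nums.take j ++ [nums[j]] := by
      rw [List.take_add_one, List.getElem?_eq_getElem hjn]
      rfl
    have hO := filter_lt_gt_len p O
    have hOlen : O.length = k - j := by simp [hOdef, ← hn]; omega
    have b1 : ((nums.take j).filter (fun x => decide (x < p))).length ≤ j := by
      have := List.length_filter_le (fun x => decide (x < p)) (nums.take j)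
      simp at this; omega
    have b2 : ((nums.drop (k + 1)).filter (fun x => decide (p < x))).length ≤ n - k - 1 := by
      have := List.length_filter_le (fun x => decide (p < x)) (nums.drop (k + 1))
      simp at this; omega
    rw [eq1, List.filter_append]
    conv_lhs => rw [eq2, List.filter_append, eqj, List.filter_append]
    rw [List.filter_cons_of_neg (by simp; omega), List.filter_nil]
    simp only [List.length_append, List.length_nil]
    omega

-- setting the last slot of a nonempty list
theorem set_mid_eq (M : List Int) (b : Int) (hM : M ≠ []) :
    M.set (M.length - 1) b = M.dropLast ++ [b] := by
  conv_lhs => rw [← List.dropLast_append_getLast hM]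
  rw [List.set_append, if_neg (by simp)]
  simp

-- setting the last slot of the middle block
theorem set_last_middle (L M G : List Int) (b : Int) (hM : M ≠ []) :
    (L ++ M ++ G).set (L.length + (M.length - 1)) b
      = L ++ (M.dropLast ++ [b]) ++ G := by
  have hM1 : 1 ≤ M.length := List.length_pos_iff.mpr hM
  rw [List.append_assoc, List.set_append, if_neg (by omega)]
  have h1 : L.length + (M.length - 1) - L.length = M.length - 1 := by omega
  rw [h1, List.set_append, if_pos (by omega), set_mid_eq M b hM]
  simp

-- setting the first slot of the middle block
theorem set_first_middle (L M G : List Int) (a : Int) (hM : M ≠ []) :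
    (L ++ M ++ G).set L.length a = L ++ (a :: M.tail) ++ G := by
  rw [List.append_assoc, List.set_append, if_neg (by omega), Nat.sub_self]
  cases M with
  | nil => exact absurd rfl hM
  | cons m t => simp

-- the trailing while-loop overwrites exactly the middle block with the pivot
theorem fillA_spec (p : Int) : ∀ (M L G : List Int),
    fillA (L ++ M ++ G) (L.length : Int) ((L.length : Int) + M.length - 1) p
      = L ++ List.replicate M.length p ++ G := by
  intro M
  induction M with
  | nil =>
    intro L G
    rw [fillA, if_neg (by simp)]
    simp
  | cons m t ih =>
    intro L G
    rw [fillA, if_pos (by simp)]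
    have hset : (L ++ (m :: t) ++ G).set (L.length : Int).toNat p
        = (L ++ [p]) ++ t ++ G := by
      rw [Int.toNat_natCast, set_first_middle L (m :: t) G p (by simp)]
      simp
    rw [hset]
    have harg1 : (L.length : Int) + 1 = ((L ++ [p]).length : Int) := by simp
    have harg2 : (L.length : Int) + (m :: t).length - 1
        = ((L ++ [p]).length : Int) + t.length - 1 := by simp; omega
    rw [harg1, harg2, ih (L ++ [p]) G]
    simp [List.replicate_succ]

theorem loopInv (nums : List Int) (p : Int) : ∀ k, k ≤ nums.length →
    ∃ M : List Int,
      (List.range k).foldl (loopBody nums p) (List.replicate nums.length 0, 0, (nums.length : Int) - 1)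
        = ((nums.take k).filter (fun x => decide (x < p)) ++ M ++ (nums.drop (nums.length - k)).filter (fun x => decide (p < x)),
           (((nums.take k).filter (fun x => decide (x < p))).length : Int),
           (nums.length : Int) - 1 - (((nums.drop (nums.length - k)).filter (fun x => decide (p < x))).length : Int))
      ∧ ((nums.take k).filter (fun x => decide (x < p))).length + M.length
          + ((nums.drop (nums.length - k)).filter (fun x => decide (p < x))).length = nums.length := by
  intro k
  induction k with
  | zero =>
    intro _
    exact ⟨List.replicate nums.length 0, by simp, by simp⟩
  | succ k ih =>
    intro hk1
    have hkn : k < nums.length := by omega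
    obtain ⟨M, hfold, hlen⟩ := ih (by omega)
    set n := nums.length with hn
    set L := (nums.take k).filter (fun x => decide (x < p)) with hL
    set G := (nums.drop (n - k)).filter (fun x => decide (p < x)) with hG
    rw [List.range_succ, List.foldl_append, hfold]
    simp only [List.foldl_cons, List.foldl_nil]
    -- the two elements examined in iteration k
    have htake : nums.take (k + 1) = nums.take k ++ [nums.getD k 0] := by
      rw [List.take_add_one, List.getElem?_eq_getElem hkn, List.getD_eq_getElem nums 0 hkn]
      rfl
    have hdrop : nums.drop (n - (k + 1)) = nums.getD (n - k - 1) 0 :: nums.drop (n - k) := by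
      have h1 : n - (k + 1) = n - k - 1 := by omega
      have h2 : n - k - 1 < nums.length := by omega
      have h3 : n - k - 1 + 1 = n - k := by omega
      rw [h1, List.drop_eq_getElem_cons h2, List.getD_eq_getElem nums 0 h2, h3]
    have hLpos : nums.getD k 0 < p →
        (nums.take (k + 1)).filter (fun x => decide (x < p)) = L ++ [nums.getD k 0] := by
      intro h
      rw [htake, List.filter_append, List.filter_cons_of_pos (by simpa using h),
        List.filter_nil, ← hL]
    have hLneg : ¬ nums.getD k 0 < p →
        (nums.take (k + 1)).filter (fun x => decide (x < p)) = L := by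
      intro h
      rw [htake, List.filter_append, List.filter_cons_of_neg (by simpa using h),
        List.filter_nil, List.append_nil, ← hL]
    have hGpos : p < nums.getD (n - k - 1) 0 →
        (nums.drop (n - (k + 1))).filter (fun x => decide (p < x)) = nums.getD (n - k - 1) 0 :: G := by
      intro h
      rw [hdrop, List.filter_cons_of_pos (by simpa using h), ← hG]
    have hGneg : ¬ p < nums.getD (n - k - 1) 0 →
        (nums.drop (n - (k + 1))).filter (fun x => decide (p < x)) = G := by
      intro h
      rw [hdrop, List.filter_cons_of_neg (by simpa using h), ← hG]
    rw [loopBody]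
    by_cases hca : nums.getD k 0 < p <;> by_cases hcb : p < nums.getD (n - k - 1) 0
    · -- both written
      have hcnt1 := countA nums p k hkn hca
      have hcnt2 := countB nums p k hkn (by rwa [show n - 1 - k = n - k - 1 by omega])
      rw [← hn, ← hG, ← hL] at hcnt1
      rw [← hn, ← hG] at hcnt2
      rw [← hn] at ⊢
      have hM : M ≠ [] := by intro h; rw [h] at hlen; simp at hlen; omega
      have hset1 : (L ++ M ++ G).set ((L.length : Int)).toNat (nums.getD k 0)
          = (L ++ [nums.getD k 0]) ++ M.tail ++ G := by
        rw [Int.toNat_natCast, set_first_middle L M G _ hM]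
        simp
      rw [hLpos hca] at hcnt2
      simp only [List.length_append, List.length_cons, List.length_nil] at hcnt2
      have htl : M.tail.length = M.length - 1 := List.length_tail
      have hMt : M.tail ≠ [] := by
        intro h
        rw [h] at htl
        simp at htl
        omega
      have hset2 : ((L ++ [nums.getD k 0]) ++ M.tail ++ G).set
            ((n : Int) - 1 - (G.length : Int)).toNat (nums.getD (n - k - 1) 0)
          = (L ++ [nums.getD k 0]) ++ (M.tail.dropLast ++ [nums.getD (n - k - 1) 0]) ++ G := by
        have hidx : ((n : Int) - 1 - (G.length : Int)).toNat
            = (L ++ [nums.getD k 0]).length + (M.tail.length - 1) := by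
          simp only [List.length_append, List.length_cons, List.length_nil]
          omega
        rw [hidx, set_last_middle _ _ _ _ hMt]
      simp only [if_pos hca, if_pos hcb]
      refine ⟨M.tail.dropLast, ?_, ?_⟩
      · rw [hset1, hset2, hLpos hca, hGpos hcb]
        refine congrArg₂ _ ?_ (congrArg₂ _ ?_ ?_)
        · simp
        · simp
        · simp only [List.length_cons]
          push_cast
          ring
      · rw [hLpos hca, hGpos hcb]
        simp only [List.length_append, List.length_cons, List.length_nil,
          List.length_dropLast]
        omega
    · -- only less written
      have hcnt1 := countA nums p k hkn hca
      rw [← hn, ← hG, ← hL] at hcnt1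
      rw [← hn] at ⊢
      have hM : M ≠ [] := by intro h; rw [h] at hlen; simp at hlen; omega
      have hset1 : (L ++ M ++ G).set ((L.length : Int)).toNat (nums.getD k 0)
          = (L ++ [nums.getD k 0]) ++ M.tail ++ G := by
        rw [Int.toNat_natCast, set_first_middle L M G _ hM]
        simp
      simp only [if_pos hca, if_neg hcb]
      refine ⟨M.tail, ?_, ?_⟩
      · rw [hset1, hLpos hca, hGneg hcb]
        refine congrArg₂ _ rfl (congrArg₂ _ ?_ rfl)
        simp
      · rw [hLpos hca, hGneg hcb]
        have htl : M.tail.length = M.length - 1 := List.length_tail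
        simp only [List.length_append, List.length_cons, List.length_nil]
        omega
    · -- only greater written
      have hcnt2 := countB nums p k hkn (by rwa [show n - 1 - k = n - k - 1 by omega])
      rw [← hn, ← hG] at hcnt2
      rw [← hn] at ⊢
      rw [hLneg hca] at hcnt2
      have hM : M ≠ [] := by intro h; rw [h] at hlen; simp at hlen; omega
      have hset2 : (L ++ M ++ G).set
            ((n : Int) - 1 - (G.length : Int)).toNat (nums.getD (n - k - 1) 0)
          = L ++ (M.dropLast ++ [nums.getD (n - k - 1) 0]) ++ G := by
        have hM1 : 1 ≤ M.length := List.length_pos_iff.mpr hM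
        have hidx : ((n : Int) - 1 - (G.length : Int)).toNat = L.length + (M.length - 1) := by
          omega
        rw [hidx, set_last_middle _ _ _ _ hM]
      simp only [if_neg hca, if_pos hcb]
      refine ⟨M.dropLast, ?_, ?_⟩
      · rw [hset2, hLneg hca, hGpos hcb]
        refine congrArg₂ _ ?_ (congrArg₂ _ rfl ?_)
        · simp
        · simp only [List.length_cons]
          push_cast
          ring
      · rw [hLneg hca, hGpos hcb]
        simp only [List.length_cons, List.length_dropLast]
        omega
    · -- nothing written
      rw [← hn] at ⊢
      simp only [if_neg hca, if_neg hcb]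
      refine ⟨M, ?_, ?_⟩
      · rw [hLneg hca, hGneg hcb]
      · rw [hLneg hca, hGneg hcb]
        omega

theorem ports_agree (nums : List Int) (p : Int) :
    pivotArrayTwoPointers nums p = pivotArrayTwoPointers_alt nums p := by
  obtain ⟨M, hfold, hlen⟩ := loopInv nums p nums.length le_rfl
  rw [List.take_length, Nat.sub_self, List.drop_zero] at hfold hlen
  simp only [pivotArrayTwoPointers, pivotArrayTwoPointers_alt]
  rw [hfold]
  have harg : (nums.length : Int) - 1 - ((nums.filter (fun x => decide (p < x))).length : Int)
      = (((nums.filter (fun x => decide (x < p))).length : Int))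
        + ((M.length : Int)) - 1 := by
    omega
  rw [harg,
    fillA_spec p M (nums.filter (fun x => decide (x < p))) (nums.filter (fun x => decide (p < x)))]
  have hMlen : M.length
      = nums.length - (nums.filter (fun x => decide (x < p))).length
        - (nums.filter (fun x => decide (p < x))).length := by omega
  rw [hMlen]

-- ===== VERDICT (by name: the statement is the Claim_ definition above) =====
theorem pivotArrayTwoPointers_spec : Claim_equal_pivotArrayTwoPointers := by
  intro nums pivot _
  unfold Spec_pivotArrayTwoPointers
  exact ports_agree nums pivot
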